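-- pv_equiv track=rewrite | github.com/daily-boj/x86chi | problems/P15820.py | solution
-- ===== SOURCE A (Python) =====
-- from typing import List
--
-- def solution(staffs: List[int], makeTO: int):
--     balloon = 0
--     time = 1
--     while balloon < makeTO:
--         for staff in staffs:
--             if time % staff == 0:
--                 balloon += 1
--         time += 1
--     return time - 1
-- ===== SOURCE B (Python) =====
-- def solution(staffs, makeTO):
--     # Binary search on the answer time t: the number of balloons produced by
--     # time t is sum(t // abs(s)) over staffs (multiples of each staff's period).
--     if makeTO <= 0:
--         return 0
--     def produced(t):
--         return sum(t // abs(s) for s in staffs)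
--     hi = 1
--     while produced(hi) < makeTO:
--         hi *= 2
--     lo = 1
--     while lo < hi:
--         mid = (lo + hi) // 2
--         if produced(mid) >= makeTO:
--             hi = mid
--         else:
--             lo = mid + 1
--     return lo
-- ===== Notes on version B (the rewrite author's own statement) =====
-- stated objective: faster
-- what changed: Replaces A's time-by-time simulation (incrementing a balloon counter once per divisible staff per time step) with a binary search on the answer time, checking each candidate t with the closed-form count sum(t // abs(s)).
import Mathlib
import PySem

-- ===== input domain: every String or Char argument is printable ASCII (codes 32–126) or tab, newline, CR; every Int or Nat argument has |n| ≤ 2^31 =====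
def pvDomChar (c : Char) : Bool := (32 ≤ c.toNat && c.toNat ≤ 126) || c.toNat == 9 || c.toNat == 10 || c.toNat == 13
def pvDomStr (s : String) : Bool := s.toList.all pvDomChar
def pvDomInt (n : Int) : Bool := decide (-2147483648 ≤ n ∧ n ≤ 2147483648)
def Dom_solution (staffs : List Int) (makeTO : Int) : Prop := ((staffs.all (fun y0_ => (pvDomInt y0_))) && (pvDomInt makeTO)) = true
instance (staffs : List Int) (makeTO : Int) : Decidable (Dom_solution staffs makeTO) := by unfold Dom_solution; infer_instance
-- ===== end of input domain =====

-- B replaces A's time-by-time simulation with a binary search on the answer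
-- time, checking a candidate t with the closed-form count sum(t // abs(s)).

-- ===== PORT A =====
-- A's while-loop; the fuel only makes the recursion total (on exhaustion it
-- returns the current `time - 1`); under Pre_ the fuel chosen in `solution`
-- is proved sufficient, so the loop stops on its own condition as in Python.
def solLoopA (staffs : List Int) (makeTO : Int) : Int → Int → Nat → Int
  | _, time, 0 => time - 1
  | balloon, time, fuel+1 =>
    if balloon < makeTO then
      solLoopA staffs makeTO
        (staffs.foldl (fun b staff => if PySem.Int.mod time staff == 0 then b + 1 else b) balloon)
        (time + 1) fuel
    else time - 1

def solution (staffs : List Int) (makeTO : Int) : Int :=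
  solLoopA staffs makeTO 0 1 (makeTO * |staffs.headD 1| + 2).toNat

-- ===== PORT B =====
-- produced(t) = sum(t // abs(s) for s in staffs)
def cntB (staffs : List Int) (t : Int) : Int :=
  staffs.foldl (fun acc s => acc + PySem.Int.floordiv t |s|) 0

-- the doubling loop `while produced(hi) < makeTO: hi *= 2`; fuel 70 only makes
-- it total (under Dom the threshold is ≤ 2^62, so 70 doublings are proved enough)
def growHiB (staffs : List Int) (makeTO : Int) : Int → Nat → Int
  | hi, 0 => hi
  | hi, fuel+1 => if cntB staffs hi < makeTO then growHiB staffs makeTO (hi * 2) fuel else hi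

-- the bisection loop `while lo < hi: ...`
def bisectB (staffs : List Int) (makeTO : Int) (lo hi : Int) : Int :=
  if _h : lo < hi then
    let mid := PySem.Int.floordiv (lo + hi) 2
    if makeTO ≤ cntB staffs mid then bisectB staffs makeTO lo mid
    else bisectB staffs makeTO (mid + 1) hi
  else lo
termination_by (hi - lo).toNat
decreasing_by
  · have h2 : PySem.Int.floordiv (lo + hi) 2 < hi := by
      rw [PySem.Int.floordiv_lt_iff_lt_mul (by omega : (0:Int) < 2)]; omega
    omega
  · have h1 := PySem.Int.floordiv_two_mid_bounds (le_of_lt _h)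
    omega

def solution_alt (staffs : List Int) (makeTO : Int) : Int :=
  if makeTO ≤ 0 then 0
  else bisectB staffs makeTO 1 (growHiB staffs makeTO 1 70)

-- ===== PRECONDITION & SPEC =====
-- Pre_ excludes only inputs where the Python A never returns: makeTO > 0 with a
-- zero staff (ZeroDivisionError) or with an empty staff list (infinite loop).
def Pre_solution (staffs : List Int) (makeTO : Int) : Prop :=
  makeTO ≤ 0 ∨ (staffs ≠ [] ∧ ∀ s ∈ staffs, s ≠ 0)
instance (staffs : List Int) (makeTO : Int) : Decidable (Pre_solution staffs makeTO) := by
  unfold Pre_solution; infer_instance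

def pvWitness_solution : List Int × Int := ([3, 2], 5)

def Spec_solution (staffs : List Int) (makeTO : Int) (out : Int) : Prop := out = solution_alt staffs makeTO
instance (staffs : List Int) (makeTO : Int) (out : Int) : Decidable (Spec_solution staffs makeTO out) := by unfold Spec_solution; infer_instance

-- ===== CLAIM (what is proved, stated in full; the proofs are below) =====
def Claim_equal_solution : Prop := ∀ (staffs : List Int) (makeTO : Int), Dom_solution staffs makeTO → Pre_solution staffs makeTO → Spec_solution staffs makeTO (solution staffs makeTO)

-- ===== LEMMAS AND PROOFS =====

-- cumulative balloon count after processing times 1..n, as A accumulates it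
def Cfun (staffs : List Int) : Nat → Int
  | 0 => 0
  | n+1 => Cfun staffs n + (staffs.countP (fun s => PySem.Int.mod ((n : Int) + 1) s == 0) : Int)

lemma fold_count (p : Int → Bool) (l : List Int) (b : Int) :
    l.foldl (fun b s => if p s then b + 1 else b) b = b + (l.countP p : Int) := by
  induction l generalizing b with
  | nil => simp
  | cons x xs ih =>
    simp only [List.foldl_cons, List.countP_cons, ih]
    by_cases h : p x <;> simp [h] <;> push_cast <;> ring

lemma ediv_succ (n d : Int) (hd : 0 < d) :
    (n + 1) / d = n / d + (if d ∣ (n + 1) then 1 else 0) := by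
  have hmod := Int.ediv_add_emod n d
  have hr0 : 0 ≤ n % d := Int.emod_nonneg n (ne_of_gt hd)
  have hrd : n % d < d := Int.emod_lt_of_pos n hd
  by_cases hdvd : d ∣ (n + 1)
  · obtain ⟨k, hk⟩ := hdvd
    rw [if_pos ⟨k, hk⟩, hk, Int.mul_ediv_cancel_left k (ne_of_gt hd)]
    have hn : n = (d - 1) + d * (k - 1) := by linarith [hk]
    rw [hn, Int.add_mul_ediv_left _ _ (ne_of_gt hd),
        Int.ediv_eq_zero_of_lt (by omega) (by omega)]
    ring
  · rw [if_neg hdvd, add_zero]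
    have hlt : n % d + 1 < d := by
      by_contra h
      have he : n % d + 1 = d := by omega
      exact hdvd ⟨n / d + 1, by linarith⟩
    have h1 : n + 1 = (n % d + 1) + d * (n / d) := by linarith
    rw [h1, Int.add_mul_ediv_left _ _ (ne_of_gt hd),
        Int.ediv_eq_zero_of_lt (by omega) hlt, zero_add]

lemma foldl_add_sum (f : Int → Int) (l : List Int) (a : Int) :
    l.foldl (fun acc s => acc + f s) a = a + (l.map f).sum := by
  induction l generalizing a with
  | nil => simp
  | cons x xs ih => simp only [List.foldl_cons, List.map_cons, List.sum_cons, ih]; ring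

lemma cnt_eq_sum (staffs : List Int) (t : Int) :
    cntB staffs t = (staffs.map (fun s => PySem.Int.floordiv t |s|)).sum := by
  unfold cntB
  rw [foldl_add_sum, zero_add]

lemma countP_as_sum (p : Int → Bool) (l : List Int) :
    ((l.countP p : Nat) : Int) = (l.map (fun s => if p s then (1:Int) else 0)).sum := by
  induction l with
  | nil => simp
  | cons x xs ih =>
    simp only [List.countP_cons, List.map_cons, List.sum_cons]
    by_cases h : p x <;> simp [h, ih] <;> push_cast <;> ring

lemma cnt_step (staffs : List Int) (hnz : ∀ s ∈ staffs, s ≠ 0) (n : Nat) :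
    cntB staffs ((n : Int) + 1)
      = cntB staffs (n : Int)
        + (staffs.countP (fun s => PySem.Int.mod ((n : Int) + 1) s == 0) : Int) := by
  rw [cnt_eq_sum, cnt_eq_sum, countP_as_sum]
  induction staffs with
  | nil => simp
  | cons x xs ih =>
    simp only [List.map_cons, List.sum_cons]
    have hx : x ≠ 0 := hnz x (by simp)
    have hd : (0:Int) < |x| := abs_pos.mpr hx
    have hstep : PySem.Int.floordiv ((n : Int) + 1) |x|
        = PySem.Int.floordiv (n : Int) |x|
          + (if PySem.Int.mod ((n : Int) + 1) x == 0 then (1:Int) else 0) := by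
      rw [PySem.Int.floordiv_eq_ediv_of_pos hd, PySem.Int.floordiv_eq_ediv_of_pos hd,
          ediv_succ _ _ hd]
      congr 1
      have : (PySem.Int.mod ((n : Int) + 1) x == 0) = decide (|x| ∣ ((n : Int) + 1)) := by
        rcases Bool.eq_false_or_eq_true (PySem.Int.mod ((n : Int) + 1) x == 0) with h | h
        · rw [h]
          have hdv : x ∣ ((n : Int) + 1) := by
            rw [← PySem.Int.mod_eq_zero_iff_dvd]
            simpa using h
          simp [abs_dvd, hdv]
        · rw [h]
          have hdv : ¬ x ∣ ((n : Int) + 1) := by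
            rw [← PySem.Int.mod_eq_zero_iff_dvd]
            simpa using h
          simp [abs_dvd, hdv]
      rw [this]
      by_cases h : |x| ∣ ((n : Int) + 1) <;> simp [h]
    rw [hstep, ih (fun s hs => hnz s (by simp [hs]))]
    ring

lemma cnt_eq_Cfun (staffs : List Int) (hnz : ∀ s ∈ staffs, s ≠ 0) (n : Nat) :
    cntB staffs (n : Int) = Cfun staffs n := by
  induction n with
  | zero =>
    simp only [Nat.cast_zero, Cfun, cnt_eq_sum]
    have : staffs.map (fun s => PySem.Int.floordiv 0 |s|) = staffs.map (fun _ => (0:Int)) := by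
      apply List.map_congr_left
      intro s hs
      have hd : (0:Int) < |s| := abs_pos.mpr (hnz s hs)
      rw [PySem.Int.floordiv_eq_ediv_of_pos hd, Int.zero_ediv]
    simp [this]
  | succ n ih =>
    have := cnt_step staffs hnz n
    rw [show ((n+1 : Nat) : Int) = (n : Int) + 1 by push_cast; ring, this, ih, Cfun]

lemma Cfun_mono (staffs : List Int) : ∀ {a b : Nat}, a ≤ b → Cfun staffs a ≤ Cfun staffs b := by
  intro a b hab
  induction b with
  | zero => simp [Nat.le_zero.mp hab]
  | succ b ih =>
    rcases Nat.lt_or_ge a (b+1) with h | h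
    · have := ih (by omega)
      have hnn : (0:Int) ≤ (staffs.countP (fun s => PySem.Int.mod ((b : Int) + 1) s == 0) : Int) := by positivity
      simp only [Cfun]; omega
    · have : a = b + 1 := by omega
      simp [this]

lemma cnt_mono (staffs : List Int) (hnz : ∀ s ∈ staffs, s ≠ 0) {a b : Int}
    (ha : 0 ≤ a) (hab : a ≤ b) : cntB staffs a ≤ cntB staffs b := by
  have ha' : a = ((a.toNat : Nat) : Int) := by omega
  have hb' : b = ((b.toNat : Nat) : Int) := by omega
  rw [ha', hb', cnt_eq_Cfun staffs hnz, cnt_eq_Cfun staffs hnz]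
  exact Cfun_mono staffs (by omega)

-- the head staff alone reaches makeTO by time makeTO * |head|
lemma cnt_bound (s0 : Int) (tl : List Int) (hnz : ∀ s ∈ (s0 :: tl), s ≠ 0)
    (M : Int) (hM : 1 ≤ M) : M ≤ cntB (s0 :: tl) (M * |s0|) := by
  have hd : (0:Int) < |s0| := abs_pos.mpr (hnz s0 (by simp))
  rw [cnt_eq_sum]
  simp only [List.map_cons, List.sum_cons]
  have h1 : PySem.Int.floordiv (M * |s0|) |s0| = M := by
    rw [PySem.Int.floordiv_eq_ediv_of_pos hd]
    exact Int.mul_ediv_cancel M (ne_of_gt hd)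
  have h2 : 0 ≤ (tl.map (fun s => PySem.Int.floordiv (M * |s0|) |s|)).sum := by
    apply List.sum_nonneg
    intro x hx
    obtain ⟨s, hs, rfl⟩ := List.mem_map.mp hx
    have hds : (0:Int) < |s| := abs_pos.mpr (hnz s (by simp [hs]))
    rw [PySem.Int.floordiv_eq_ediv_of_pos hds]
    exact Int.ediv_nonneg (by positivity) (le_of_lt hds)
  omega

lemma loopA_correct (staffs : List Int) (M : Int) (r : Nat)
    (hr : M ≤ Cfun staffs r) (hmin : ∀ u, u < r → Cfun staffs u < M) :
    ∀ fuel n, n ≤ r → r - n < fuel →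
      solLoopA staffs M (Cfun staffs n) ((n : Int) + 1) fuel = (r : Int) := by
  intro fuel
  induction fuel with
  | zero => intro n _ h; omega
  | succ fuel ih =>
    intro n hn hfuel
    rcases Nat.lt_or_ge n r with h | h
    · have hcond : Cfun staffs n < M := hmin n h
      simp only [solLoopA, if_pos hcond]
      rw [fold_count]
      have : Cfun staffs n + (staffs.countP (fun s => PySem.Int.mod ((n : Int) + 1) s == 0) : Int)
          = Cfun staffs (n+1) := by simp [Cfun]
      rw [this, show ((n : Int) + 1) + 1 = ((n+1 : Nat) : Int) + 1 by push_cast; ring]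
      exact ih (n+1) (by omega) (by omega)
    · have hnr : n = r := by omega
      subst hnr
      have hcond : ¬ (Cfun staffs n < M) := by omega
      simp only [solLoopA, if_neg hcond]
      omega

lemma growHi_correct (staffs : List Int) (M T : Int)
    (hT : ∀ t : Int, T ≤ t → M ≤ cntB staffs t) :
    ∀ fuel (hi : Int), 1 ≤ hi → T ≤ 2 ^ fuel * hi →
      1 ≤ growHiB staffs M hi fuel ∧ M ≤ cntB staffs (growHiB staffs M hi fuel) := by
  intro fuel
  induction fuel with
  | zero =>
    intro hi h1 h2
    simp only [pow_zero, one_mul] at h2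
    exact ⟨h1, hT hi h2⟩
  | succ fuel ih =>
    intro hi h1 h2
    simp only [growHiB]
    by_cases hc : cntB staffs hi < M
    · rw [if_pos hc]
      exact ih (hi * 2) (by omega) (by rw [pow_succ] at h2; linarith)
    · rw [if_neg hc]
      exact ⟨h1, by omega⟩

lemma bisect_correct (staffs : List Int) (M : Int) :
    ∀ (k : Nat) (lo hi : Int), (hi - lo).toNat ≤ k →
      1 ≤ lo → lo ≤ hi → cntB staffs (lo - 1) < M → M ≤ cntB staffs hi →
      1 ≤ bisectB staffs M lo hi ∧ cntB staffs (bisectB staffs M lo hi - 1) < M ∧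
        M ≤ cntB staffs (bisectB staffs M lo hi) := by
  intro k
  induction k with
  | zero =>
    intro lo hi hk h1 hle hlo hhi
    have hlohi : lo = hi := by omega
    have heq : bisectB staffs M lo hi = lo := by
      rw [bisectB]
      simp only [dif_neg (show ¬ lo < hi by omega)]
    subst hlohi
    rw [heq]
    exact ⟨h1, hlo, hhi⟩
  | succ k ih =>
    intro lo hi hk h1 hle hlo hhi
    by_cases hlt : lo < hi
    · have hb := PySem.Int.floordiv_two_mid_bounds (le_of_lt hlt)
      have hmlt : PySem.Int.floordiv (lo + hi) 2 < hi := by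
        rw [PySem.Int.floordiv_lt_iff_lt_mul (by omega : (0:Int) < 2)]; omega
      by_cases hc : M ≤ cntB staffs (PySem.Int.floordiv (lo + hi) 2)
      · have heq : bisectB staffs M lo hi
            = bisectB staffs M lo (PySem.Int.floordiv (lo + hi) 2) := by
          rw [bisectB]
          simp only [dif_pos hlt, if_pos hc]
        rw [heq]
        exact ih lo _ (by omega) h1 hb.1 hlo hc
      · have heq : bisectB staffs M lo hi
            = bisectB staffs M (PySem.Int.floordiv (lo + hi) 2 + 1) hi := by
          rw [bisectB]
          simp only [dif_pos hlt, if_neg hc]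
        rw [heq]
        have hc' : cntB staffs (PySem.Int.floordiv (lo + hi) 2 + 1 - 1) < M := by
          simpa using lt_of_not_ge hc
        exact ih _ hi (by omega) (by omega) (by omega) hc' hhi
    · have hlohi : lo = hi := by omega
      have heq : bisectB staffs M lo hi = lo := by
        rw [bisectB]
        simp only [dif_neg hlt]
      subst hlohi
      rw [heq]
      exact ⟨h1, hlo, hhi⟩

-- ===== VERDICT (by name: the statement is the Claim_ definition above) =====
theorem solution_spec : Claim_equal_solution := by
  intro staffs M hdom hpre
  unfold Spec_solution
  by_cases hM : M ≤ 0
  · -- both return 0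
    have hA : solution staffs M = 0 := by
      unfold solution
      cases h : (M * |staffs.headD 1| + 2).toNat with
      | zero => simp [solLoopA]
      | succ f => simp [solLoopA, show ¬ ((0:Int) < M) by omega]
    rw [hA]
    unfold solution_alt
    rw [if_pos hM]
  · have hM1 : 1 ≤ M := by omega
    rcases hpre with h | ⟨hne, hnz⟩
    · omega
    obtain ⟨s0, tl, rfl⟩ : ∃ s0 tl, staffs = s0 :: tl := by
      cases staffs with
      | nil => exact absurd rfl hne
      | cons a l => exact ⟨a, l, rfl⟩
    set staffs := s0 :: tl with hst
    have hd : (0:Int) < |s0| := abs_pos.mpr (hnz s0 (by simp [hst]))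
    -- the crossing point r
    have hT0 : (0:Int) ≤ M * |s0| := mul_nonneg (by omega) (abs_nonneg s0)
    have hcast : (((M * |s0|).toNat : Nat) : Int) = M * |s0| := Int.toNat_of_nonneg hT0
    have hex : ∃ n : Nat, M ≤ Cfun staffs n := by
      refine ⟨(M * |s0|).toNat, ?_⟩
      rw [← cnt_eq_Cfun staffs hnz, hcast]
      exact cnt_bound s0 tl hnz M hM1
    classical
    set r := Nat.find hex with hrdef
    have hrP : M ≤ Cfun staffs r := Nat.find_spec hex
    have hrmin : ∀ u, u < r → Cfun staffs u < M := by
      intro u hu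
      have := Nat.find_min hex hu
      omega
    have hrle : r ≤ (M * |s0|).toNat := by
      apply Nat.find_le
      rw [← cnt_eq_Cfun staffs hnz, hcast]
      exact cnt_bound s0 tl hnz M hM1
    -- A returns r
    have hA : solution staffs M = (r : Int) := by
      unfold solution
      have h0 : Cfun staffs 0 = 0 := rfl
      have := loopA_correct staffs M r hrP hrmin ((M * |staffs.headD 1| + 2).toNat) 0
        (by omega) (by simp only [hst, List.headD_cons]; omega)
      simpa [h0] using this
    rw [hA]
    -- B returns r
    -- Dom bounds: M*|s0| ≤ 2^62 ≤ 2^70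
    have hdomM : M ≤ 2147483648 := by
      unfold Dom_solution at hdom
      simp only [Bool.and_eq_true, decide_eq_true_eq, pvDomInt] at hdom
      omega
    have hdoms0 : |s0| ≤ 2147483648 := by
      unfold Dom_solution at hdom
      simp only [List.all_cons, Bool.and_eq_true, decide_eq_true_eq, pvDomInt, hst] at hdom
      obtain ⟨⟨h1, _⟩, _⟩ := hdom
      exact abs_le.mpr ⟨by omega, by omega⟩
    have hTbound : M * |s0| ≤ 2 ^ 70 := by
      calc M * |s0| ≤ 2147483648 * 2147483648 := by
            apply mul_le_mul hdomM hdoms0 (le_of_lt hd) (by omega)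
        _ ≤ 2 ^ 70 := by norm_num
    have hmonoT : ∀ t : Int, M * |s0| ≤ t → M ≤ cntB staffs t := by
      intro t ht
      calc M ≤ cntB staffs (M * |s0|) := cnt_bound s0 tl hnz M hM1
        _ ≤ cntB staffs t := cnt_mono staffs hnz (mul_nonneg (by omega) (abs_nonneg s0)) ht
    obtain ⟨hH1, hHP⟩ := growHi_correct staffs M (M * |s0|) hmonoT 70 1
      (le_refl 1) (by omega)
    have hlo0 : cntB staffs ((1:Int) - 1) < M := by
      have : cntB staffs ((0:Nat) : Int) = Cfun staffs 0 := cnt_eq_Cfun staffs hnz 0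
      simp only [Nat.cast_zero] at this
      norm_num [this, Cfun]
      omega
    obtain ⟨hres1, hresL, hresP⟩ := bisect_correct staffs M
      ((growHiB staffs M 1 70 - 1).toNat) 1 (growHiB staffs M 1 70)
      (by omega) (le_refl 1) hH1 hlo0 hHP
    set res := bisectB staffs M 1 (growHiB staffs M 1 70) with hres
    have hBval : solution_alt staffs M = res := by
      unfold solution_alt
      rw [if_neg hM]
    rw [hBval]
    -- uniqueness: res = r
    set n := res.toNat with hn
    have hresn : res = (n : Int) := by omega
    have hn1 : 1 ≤ n := by omega
    have hCn : M ≤ Cfun staffs n := by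
      rw [← cnt_eq_Cfun staffs hnz, ← hresn]; exact hresP
    have hCn1 : Cfun staffs (n - 1) < M := by
      rw [← cnt_eq_Cfun staffs hnz, show (((n - 1 : Nat) : Nat) : Int) = res - 1 by omega]
      exact hresL
    have hrn : r ≤ n := Nat.find_le hCn
    have hnr : n ≤ r := by
      by_contra h
      have h : r < n := by omega
      have : Cfun staffs r ≤ Cfun staffs (n - 1) := Cfun_mono staffs (by omega)
      omega
    have : n = r := by omega
    rw [hresn, this]
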